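-- pv_equiv track=rewrite | github.com/jaishals/snap | snapESLib/sample/snap_test_dataGenerator.py | mapFlowsToLsps
-- ===== SOURCE A (Python) =====
-- import collections
--
-- def mapFlowsToLsps(flowList, lspList):
--     lenOfFlowList = len(flowList)
--     lenOfLspList  = len(lspList)
--     lspInfo  = collections.OrderedDict()
--     flows    = []
--     lspIter  = 0
--     if lenOfFlowList == 0:
--         return
--     if lenOfLspList == 0:
--         return
--     for f in flowList:
--         #loop over
--         lspInfo  = lspList[lspIter]
--         if "Flows" in lspInfo.keys():
--             flows = lspInfo["Flows"]
--             flows.append(f)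
--         else:
--             flows.append(f)
--             lspInfo["Flows"] = flows
--         flows = []
--         lspIter+=1
--         if lspIter == (lenOfLspList):
--             lspIter = 0
--     return flowList, lspList
-- ===== SOURCE B (Python) =====
-- def mapFlowsToLsps(flowList, lspList):
--     if not flowList or not lspList:
--         return None
--     step = len(lspList)
--     for i, lsp in enumerate(lspList):
--         seg = flowList[i::step]
--         if seg:
--             lsp.setdefault("Flows", []).extend(seg)
--     return flowList, lspList
-- ===== Notes on version B (the rewrite author's own statement) =====
-- stated objective: simpler
-- what changed: Replaces A's round-robin pass over flows (wrapping counter, one dict lookup/update per flow) by one loop over LSP indices that assigns each LSP its strided slice flowList[i::len(lspList)] with a single setdefault/extend per LSP.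
import Mathlib
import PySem

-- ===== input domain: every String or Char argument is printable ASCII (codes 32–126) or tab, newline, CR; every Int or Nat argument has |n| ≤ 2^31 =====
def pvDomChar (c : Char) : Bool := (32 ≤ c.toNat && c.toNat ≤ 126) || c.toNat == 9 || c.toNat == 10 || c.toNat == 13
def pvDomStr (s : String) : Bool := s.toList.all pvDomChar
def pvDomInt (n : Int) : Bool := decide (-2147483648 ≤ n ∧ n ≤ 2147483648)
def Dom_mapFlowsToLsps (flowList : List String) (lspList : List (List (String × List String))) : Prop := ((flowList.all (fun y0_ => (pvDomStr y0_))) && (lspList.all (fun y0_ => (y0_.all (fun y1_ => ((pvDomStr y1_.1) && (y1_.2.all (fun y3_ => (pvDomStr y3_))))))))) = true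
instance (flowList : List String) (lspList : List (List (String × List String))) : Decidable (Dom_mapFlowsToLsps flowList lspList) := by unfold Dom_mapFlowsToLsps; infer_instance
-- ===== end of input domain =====

-- B replaces A's round-robin pass over flows (wrapping counter, per-flow dict update) by one
-- strided slice flowList[i::len(lspList)] per LSP, extended in a single setdefault/extend; the
-- equivalence proved is about the RETURN value (both Pythons also mutate lspList's dicts in place).


-- ===== PORT A =====
-- A-side helper: one iteration's dict update — if "Flows" is a key, append f to its list
-- (Python mutates the value list in place), else add the key "Flows" with [f] at the end.
def pvAppendFlowA (d : List (String × List String)) (f : String) : List (String × List String) :=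
  if d.any (fun p => p.1 == "Flows")
  then d.map (fun p => if p.1 == "Flows" then (p.1, p.2 ++ [f]) else p)
  else d ++ [("Flows", [f])]

-- A's for-loop over flowList with the wrapping counter lspIter.
def pvLoopA : List String → List (List (String × List String)) → Nat → List (List (String × List String))
  | [], lspList, _ => lspList
  | f :: fs, lspList, lspIter =>
      let lspInfo := lspList.getD lspIter []   -- lspList[lspIter]; lspIter < length throughout
      let lspList' := lspList.set lspIter (pvAppendFlowA lspInfo f)
      let next := lspIter + 1
      pvLoopA fs lspList' (if next = lspList.length then 0 else next)

def mapFlowsToLsps (flowList : List String) (lspList : List (List (String × List String))) : Option (List String × (List (List (String × List String)))) :=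
  let lenOfFlowList := flowList.length
  let lenOfLspList := lspList.length
  if lenOfFlowList = 0 then none
  else if lenOfLspList = 0 then none
  else some (flowList, pvLoopA flowList lspList 0)

-- ===== PORT B =====
-- B-side helper: lsp.setdefault("Flows", []).extend(seg) — extend the existing "Flows" list
-- in place, or add the key "Flows" with seg at the end.
def pvExtendFlowsB (d : List (String × List String)) (seg : List String) : List (String × List String) :=
  if d.any (fun p => p.1 == "Flows")
  then d.map (fun p => if p.1 == "Flows" then (p.1, p.2 ++ seg) else p)
  else d ++ [("Flows", seg)]

def mapFlowsToLsps_alt (flowList : List String) (lspList : List (List (String × List String))) : Option (List String × (List (List (String × List String)))) :=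
  if flowList.isEmpty || lspList.isEmpty then none
  else
    let step := lspList.length
    some (flowList, lspList.mapIdx (fun i lsp =>
      -- seg = flowList[i::step]; step > 0 here so the slice never raises and getD [] is exact
      let seg := (PySem.List.slice? flowList (some (i : Int)) none (step : Int)).getD []
      if seg.isEmpty then lsp else pvExtendFlowsB lsp seg))

-- ===== PRECONDITION & SPEC =====
def Spec_mapFlowsToLsps (flowList : List String) (lspList : List (List (String × List String))) (out : Option (List String × (List (List (String × List String))))) : Prop := out = mapFlowsToLsps_alt flowList lspList
instance (flowList : List String) (lspList : List (List (String × List String))) (out : Option (List String × (List (List (String × List String))))) : Decidable (Spec_mapFlowsToLsps flowList lspList out) := by unfold Spec_mapFlowsToLsps; infer_instance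

-- ===== CLAIM (what is proved, stated in full; the proofs are below) =====
def Claim_equal_mapFlowsToLsps : Prop := ∀ (flowList : List String) (lspList : List (List (String × List String))), Dom_mapFlowsToLsps flowList lspList → Spec_mapFlowsToLsps flowList lspList (mapFlowsToLsps flowList lspList)

-- ===== LEMMAS AND PROOFS =====

-- every n-th element of a list (Python's xs[::n] for n > 0)
def pvStrided (n : Nat) : List String → List String
  | [] => []
  | f :: fs => f :: pvStrided n (fs.drop (n - 1))
  termination_by l => l.length
  decreasing_by simp

-- offset inside the flow stream at which LSP j (counter currently k, n LSPs) takes its next flow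
def pvOff (j k n : Nat) : Nat := if k ≤ j then j - k else n + j - k

theorem pvStrided_nil (n : Nat) : pvStrided n [] = [] := by rw [pvStrided.eq_def]

theorem pvStrided_cons (n : Nat) (f : String) (fs : List String) :
    pvStrided n (f :: fs) = f :: pvStrided n (fs.drop (n - 1)) := by rw [pvStrided.eq_def]

theorem pvFilterMap_strided (n : Nat) (hn : 0 < n) :
    ∀ (c : Nat) (gs : List String), gs.length ≤ n * c →
    List.filterMap (fun k => gs[n * k]?) (List.range c) = pvStrided n gs := by
  intro c
  induction c with
  | zero =>
    intro gs h
    have hgs : gs = [] := List.length_eq_zero_iff.mp (by omega)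
    subst hgs
    simp [pvStrided_nil]
  | succ c ih =>
    intro gs h
    cases gs with
    | nil => simp [pvStrided_nil]
    | cons f rest =>
      rw [List.range_succ_eq_map]
      have h0 : (f :: rest)[n * 0]? = some f := by simp
      simp only [List.filterMap_cons, h0, List.filterMap_map]
      have hdrop : (f :: rest).drop n = rest.drop (n - 1) := by
        obtain ⟨m, rfl⟩ : ∃ m, n = m + 1 := ⟨n - 1, by omega⟩
        simp [List.drop_succ_cons]
      have hlen : (rest.drop (n - 1)).length ≤ n * c := by
        simp only [List.length_drop]
        simp only [List.length_cons] at h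
        have hmul : n * (c + 1) = n * c + n := by ring
        omega
      rw [pvStrided_cons]
      congr 1
      rw [← ih _ hlen]
      apply List.filterMap_congr
      intro k _
      simp only [Function.comp, Nat.succ_eq_add_one]
      rw [← hdrop, List.getElem?_drop]
      congr 1
      ring

-- xs[i::n] (n > 0) is pvStrided n (xs.drop i)
theorem pvSlice_eq_strided (fs : List String) (i n : Nat) (hn : 0 < n) :
    PySem.List.slice? fs (some (i : Int)) none (n : Int) = some (pvStrided n (fs.drop i)) := by
  have hstep0 : ¬((n : Int) = 0) := by omega
  have hstepneg : ¬((n : Int) < 0) := by omega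
  have hi : ¬((i : Int) < 0) := by omega
  have hpos : 0 < (n : Int) := by omega
  simp only [PySem.List.slice?, PySem.List.sliceIndices, hstep0, hstepneg, hi, if_false,
    if_pos hpos]
  have hmin : min (i : Int) (fs.length : Int) = ((min i fs.length : Nat) : Int) := by
    push_cast; rfl
  rw [hmin]
  set s : Nat := min i fs.length with hs
  by_cases hcase : s < fs.length
  · have hilen : i < fs.length := by omega
    have hsi : s = i := by omega
    have hcint : ((s : Int) : Int) < (fs.length : Int) := by omega
    rw [if_pos (by omega : ((s : Nat) : Int) < (fs.length : Int))]
    set q : Int := ((fs.length : Int) - (s : Int) + (n : Int) - 1) / (n : Int) with hqdef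
    set c : Nat := q.toNat with hc
    have hbound : (fs.drop s).length ≤ n * c := by
      have hdiv := Int.mul_ediv_add_emod ((fs.length : Int) - (s : Int) + (n : Int) - 1) (n : Int)
      have hmod1 := Int.emod_nonneg ((fs.length : Int) - (s : Int) + (n : Int) - 1) hstep0
      have hmod2 := Int.emod_lt_of_pos ((fs.length : Int) - (s : Int) + (n : Int) - 1) hpos
      have hq : (fs.length : Int) - (s : Int) ≤ (n : Int) * q := by rw [hqdef]; omega
      have hq0 : 0 ≤ q := Int.ediv_nonneg (by omega) (by omega)
      have hcast : ((n * c : Nat) : Int) = (n : Int) * q := by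
        push_cast [hc, Int.toNat_of_nonneg hq0]
        ring
      simp only [List.length_drop]
      omega
    have hidx : (fun x : Nat => fs[((s : Int) + (n : Int) * (x : Int)).toNat]?) =
        (fun x : Nat => (fs.drop s)[n * x]?) := by
      funext x
      have ht : ((s : Int) + (n : Int) * (x : Int)).toNat = s + n * x := by omega
      rw [ht, List.getElem?_drop]
    rw [hidx]
    rw [pvFilterMap_strided n hn c _ hbound]
    rw [hsi]
  · rw [if_neg (by omega : ¬(((s : Nat) : Int) < (fs.length : Int)))]
    have hdi : fs.drop i = [] := List.drop_eq_nil_of_le (by omega)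
    simp [hdi, pvStrided_nil]

-- pvAppendFlowA is the single-element case of pvExtendFlowsB
theorem pvAppend_eq_extend_single (d : List (String × List String)) (f : String) :
    pvAppendFlowA d f = pvExtendFlowsB d [f] := rfl

-- composing two extends is one extend with the concatenation
theorem pvExtend_extend (d : List (String × List String)) (s1 s2 : List String) :
    pvExtendFlowsB (pvExtendFlowsB d s1) s2 = pvExtendFlowsB d (s1 ++ s2) := by
  by_cases h : d.any (fun p => p.1 == "Flows") = true
  · have hmap : (d.map (fun p => if p.1 == "Flows" then (p.1, p.2 ++ s1) else p)).any
        (fun p => p.1 == "Flows") = true := by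
      rcases List.any_eq_true.mp h with ⟨p, hp, hpf⟩
      apply List.any_eq_true.mpr
      refine ⟨if p.1 == "Flows" then (p.1, p.2 ++ s1) else p, List.mem_map_of_mem hp, ?_⟩
      simp [hpf]
    simp only [pvExtendFlowsB, h, if_true, hmap, List.map_map]
    congr 1
    funext p
    by_cases hp : p.1 == "Flows" <;> simp [hp, Function.comp]
  · have hkeys : ∀ p ∈ d, (p.1 == "Flows") = false := by
      intro p hp
      by_contra hcon
      exact h (List.any_eq_true.mpr ⟨p, hp, by simpa using hcon⟩)
    have hd : d.map (fun p => if p.1 = "Flows" then (p.1, p.2 ++ s2) else p) = d := by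
      conv_rhs => rw [← List.map_id d]
      apply List.map_congr_left
      intro p hp
      have h2 : p.1 ≠ "Flows" := by simpa using hkeys p hp
      simp [h2]
    simp [pvExtendFlowsB, h, hd]

-- one A-step followed by an extend equals one extend with the flow consed on
theorem pvStep_extend (d : List (String × List String)) (f : String) (s : List String) :
    (if s.isEmpty then pvAppendFlowA d f else pvExtendFlowsB (pvAppendFlowA d f) s) =
    pvExtendFlowsB d (f :: s) := by
  cases s with
  | nil => simp [pvAppend_eq_extend_single]
  | cons a s' =>
    simp only [List.isEmpty_cons, Bool.false_eq_true, if_false]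
    rw [pvAppend_eq_extend_single, pvExtend_extend]
    rfl

-- the wrapping-counter loop of A, characterised index-by-index by strided segments
theorem pvLoopA_eq_mapIdx (fs : List String) :
    ∀ (L : List (List (String × List String))) (k : Nat), k < L.length →
    pvLoopA fs L k = L.mapIdx (fun j d =>
      let seg := pvStrided L.length (fs.drop (pvOff j k L.length))
      if seg.isEmpty then d else pvExtendFlowsB d seg) := by
  induction fs with
  | nil =>
    intro L k hk
    simp only [pvLoopA, List.drop_nil, pvStrided_nil, List.isEmpty_nil, if_true]
    apply List.ext_getElem
    · simp
    · intro j hj1 hj2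
      rw [List.getElem_mapIdx]
  | cons f fs ih =>
    intro L k hk
    have hn : 0 < L.length := by omega
    set n := L.length with hnL
    set k' := if k + 1 = n then 0 else k + 1 with hk'
    have hk'lt : k' < n := by
      by_cases h : k + 1 = n <;> simp [hk', h] <;> omega
    set L' := L.set k (pvAppendFlowA (L.getD k []) f) with hL'
    have hL'len : L'.length = n := by rw [hL', List.length_set]
    have lhs : pvLoopA (f :: fs) L k = pvLoopA fs L' k' := by
      simp only [pvLoopA]
      rw [← hnL]
    rw [lhs, ih L' k' (by omega)]
    apply List.ext_getElem
    · simp [hL'len, hnL]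
    · intro j hj1 hj2
      have hjn : j < n := by simpa [hL'len] using hj1
      rw [List.getElem_mapIdx, List.getElem_mapIdx]
      simp only [hL'len]
      by_cases hjk : j = k
      · subst hjk
        have hL'j : L'[j]'(by omega) = pvAppendFlowA (L[j]'(by omega)) f := by
          simp [hL', List.getElem_set_self, List.getElem?_eq_getElem (show j < L.length by omega),
            List.getD]
        have hoff0 : pvOff j j n = 0 := by simp [pvOff]
        have hoffk' : pvOff j k' n = n - 1 := by
          by_cases h : j + 1 = n <;> simp [hk', h, pvOff] <;> omega
        rw [hL'j, hoff0, hoffk']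
        simp only [List.drop_zero]
        rw [pvStrided_cons]
        rw [show (f :: pvStrided n (fs.drop (n - 1))).isEmpty = false from rfl]
        simp only [Bool.false_eq_true, if_false]
        exact pvStep_extend _ f _
      · have hL'j : L'[j]'(by omega) = L[j]'(by omega) := by
          simp [hL', List.getElem_set_ne (Ne.symm hjk)]
        have hoff : pvOff j k n = pvOff j k' n + 1 := by
          by_cases h : k + 1 = n <;> simp [hk', h, pvOff] <;> split_ifs <;> omega
        rw [hL'j, hoff, List.drop_succ_cons]

-- ===== VERDICT (by name: the statement is the Claim_ definition above) =====
theorem mapFlowsToLsps_spec : Claim_equal_mapFlowsToLsps := by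
  intro flowList lspList _
  unfold Spec_mapFlowsToLsps mapFlowsToLsps mapFlowsToLsps_alt
  by_cases hf : flowList.length = 0
  · simp [List.eq_nil_of_length_eq_zero hf]
  · by_cases hl : lspList.length = 0
    · simp [hf, List.eq_nil_of_length_eq_zero hl]
    · have hfne : flowList.isEmpty = false := by
        simp; exact fun h => hf (by simp [h])
      have hlne : lspList.isEmpty = false := by
        simp; exact fun h => hl (by simp [h])
      have hn : 0 < lspList.length := by omega
      simp only [hf, hl, if_false, hfne, hlne, Bool.or_self, Bool.false_eq_true]
      refine congrArg some (congrArg (Prod.mk flowList) ?_)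
      rw [pvLoopA_eq_mapIdx flowList lspList 0 hn]
      apply List.ext_getElem
      · simp
      · intro j hj1 hj2
        rw [List.getElem_mapIdx, List.getElem_mapIdx]
        rw [pvSlice_eq_strided flowList j lspList.length hn]
        simp [pvOff]
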